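-- pv_equiv track=rewrite | github.com/tomo920/QCArchitectrue-QOMDP | quantumcircuit/qc.py | enum_control_bn
-- ===== SOURCE A (Python) =====
-- import copy
--
-- def enum_control_bn(control_bn, target_bn):
--     '''
--     Enumerate all combinations of control bits and target bits of control gate.
--
--     Args
--     ----------
--     control_bn: list
--         List of index of control bit.
--     target_bn: list
--         List of index of target bit.
--
--     Returns
--     ----------
--     List of combinations of control bit and target bit.
--     '''
--
--     if len(target_bn) == len(control_bn) == 1:
--         return [[[control_bn[0], target_bn[0]]]]
--     else:
--         inds = []
--         for t in target_bn:
--             target_bn_copy = copy.copy(target_bn)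
--             target_bn_copy.remove(t)
--             control_bn_copy = copy.copy(control_bn)
--             inds_ =  enum_control_bn(control_bn_copy[1:], target_bn_copy)
--             for ind in inds_:
--                 ind.extend([[control_bn[0], t]])
--                 inds.extend([ind])
--         return inds
-- ===== SOURCE B (Python) =====
-- import itertools
--
-- def enum_control_bn(control_bn, target_bn):
--     if len(control_bn) != len(target_bn) or not control_bn:
--         return []
--     return [[[c, t] for c, t in zip(control_bn, perm)][::-1]
--             for perm in itertools.permutations(target_bn)]
-- ===== Notes on version B (the rewrite author's own statement) =====
-- stated objective: idiomatic
-- what changed: Replaced A's recursive copy/remove-by-value enumeration with an up-front length guard plus a single comprehension over itertools.permutations(target_bn), pairing each permutation with control_bn by zip and reversing.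
import Mathlib
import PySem

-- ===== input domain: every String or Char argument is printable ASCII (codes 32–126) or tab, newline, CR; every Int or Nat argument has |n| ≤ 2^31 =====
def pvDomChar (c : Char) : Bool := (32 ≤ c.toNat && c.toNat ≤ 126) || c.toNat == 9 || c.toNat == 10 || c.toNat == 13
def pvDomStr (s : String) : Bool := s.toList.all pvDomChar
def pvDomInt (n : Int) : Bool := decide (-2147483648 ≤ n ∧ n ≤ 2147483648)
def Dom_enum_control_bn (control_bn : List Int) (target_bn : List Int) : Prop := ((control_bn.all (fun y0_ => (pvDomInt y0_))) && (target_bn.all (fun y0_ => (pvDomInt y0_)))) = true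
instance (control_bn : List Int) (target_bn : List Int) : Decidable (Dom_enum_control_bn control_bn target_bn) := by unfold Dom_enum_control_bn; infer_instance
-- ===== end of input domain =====

-- B enumerates the pairings directly from itertools-style permutations of target_bn
-- instead of A's recursive copy/remove mutation; objective: more idiomatic/simpler.

-- ===== PORT A =====
-- literal transliteration of A's recursion; the foldl over target_bn.attach is the
-- 'for t in target_bn' loop (attach only carries the membership proof for termination);
-- control_bn[0] is only reached when the recursive result is nonempty, which forces
-- control_bn ≠ [], so headD 0 is exact.
def enum_control_bn (control_bn : List Int) (target_bn : List Int) : List (List (List Int)) :=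
  if target_bn.length = 1 ∧ control_bn.length = 1 then
    [[[control_bn.headD 0, target_bn.headD 0]]]
  else
    target_bn.attach.foldl (fun inds tt =>
      let target_bn_copy := (PySem.List.remove? target_bn tt.1).getD []
      let inds_ := enum_control_bn (control_bn.drop 1) target_bn_copy
      inds ++ inds_.map (fun ind => ind ++ [[control_bn.headD 0, tt.1]])) []
termination_by target_bn.length
decreasing_by
  rw [PySem.List.remove?_eq_some_erase _ _ tt.2, Option.getD_some]
  have := List.length_erase_of_mem tt.2
  have : 1 ≤ target_bn.length := List.length_pos_of_mem tt.2
  omega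

-- ===== PORT B =====
-- itertools.permutations in its enumeration order (choose index 0..len-1, recurse on
-- the list with that index removed); fuel = list length.
def pyPermsGo : Nat → List Int → List (List Int)
  | 0, _ => [[]]
  | n + 1, l =>
      (List.range l.length).flatMap (fun i =>
        (pyPermsGo n (l.eraseIdx i)).map (fun p => l.getD i 0 :: p))

def pyPerms (l : List Int) : List (List Int) := pyPermsGo l.length l

def enum_control_bn_alt (control_bn : List Int) (target_bn : List Int) : List (List (List Int)) :=
  if control_bn.length ≠ target_bn.length ∨ control_bn.length = 0 then []
  else
    (pyPerms target_bn).map (fun perm =>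
      (List.zipWith (fun c t => [c, t]) control_bn perm).reverse)

-- ===== PRECONDITION & SPEC =====
-- Pre_ excludes equal-length inputs whose target list has ≥ 3 entries with a duplicate:
-- there A's remove-by-value recursion makes the ORDER of the (equal-as-multiset) list of
-- pairings an accident of its implementation, and B's index-based permutation order is
-- equally defensible.  (With unequal lengths or ≤ 2 targets the two agree and Pre_ holds.)
def Pre_enum_control_bn (control_bn : List Int) (target_bn : List Int) : Prop :=
  control_bn.length ≠ target_bn.length ∨ target_bn.length ≤ 2 ∨ target_bn.Nodup
instance (control_bn : List Int) (target_bn : List Int) : Decidable (Pre_enum_control_bn control_bn target_bn) := by unfold Pre_enum_control_bn; infer_instance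

def pvWitness_enum_control_bn : List Int × List Int := ([1, 2], [3, 4])

def Spec_enum_control_bn (control_bn : List Int) (target_bn : List Int) (out : List (List (List Int))) : Prop := out = enum_control_bn_alt control_bn target_bn
instance (control_bn : List Int) (target_bn : List Int) (out : List (List (List Int))) : Decidable (Spec_enum_control_bn control_bn target_bn out) := by unfold Spec_enum_control_bn; infer_instance

-- ===== CLAIM (what is proved, stated in full; the proofs are below) =====
def Claim_equal_enum_control_bn : Prop := ∀ (control_bn : List Int) (target_bn : List Int), Dom_enum_control_bn control_bn target_bn → Pre_enum_control_bn control_bn target_bn → Spec_enum_control_bn control_bn target_bn (enum_control_bn control_bn target_bn)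

-- ===== LEMMAS AND PROOFS =====

-- one-step unfolding of A outside the base case, as a flatMap over target_bn
lemma enum_step (c t : List Int) (h : ¬ (t.length = 1 ∧ c.length = 1)) :
    enum_control_bn c t =
      t.flatMap (fun x =>
        (enum_control_bn (c.drop 1) ((PySem.List.remove? t x).getD [])).map
          (fun ind => ind ++ [[c.headD 0, x]])) := by
  rw [enum_control_bn.eq_def]
  simp only [if_neg h]
  rw [PySem.List.foldl_append_eq_flatMap]
  rw [← List.attach_map_subtype_val t, List.flatMap_map]
  simp

lemma enum_uneq (n : Nat) : ∀ (t c : List Int), t.length ≤ n →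
    c.length ≠ t.length → enum_control_bn c t = [] := by
  induction n with
  | zero =>
    intro t c hle hne
    have ht : t = [] := List.eq_nil_of_length_eq_zero (Nat.le_zero.mp hle)
    subst ht
    rw [enum_step _ _ (by simp)]
    simp
  | succ n ih =>
    intro t c hle hne
    rw [enum_step _ _ (by rintro ⟨h1, h2⟩; omega)]
    rw [List.flatMap_eq_nil_iff]
    intro x hx
    rw [PySem.List.remove?_eq_some_erase _ _ hx, Option.getD_some]
    have hlt : 1 ≤ t.length := List.length_pos_of_mem hx
    have hlen : (t.erase x).length = t.length - 1 := List.length_erase_of_mem hx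
    have h0 : enum_control_bn (c.drop 1) (t.erase x) = [] := by
      by_cases hc : c.length = 0 ∧ t.length = 1
      · -- inner call is on ([], []): no base case, empty loop
        have hc1 : c.drop 1 = [] := by
          have : c = [] := List.eq_nil_of_length_eq_zero hc.1; simp [this]
        have ht1 : t.erase x = [] := List.eq_nil_of_length_eq_zero (by omega)
        rw [hc1, ht1, enum_step _ _ (by simp)]
        simp
      · apply ih _ _ (by simp [hlen]; omega)
        simp only [hlen, List.length_drop]
        omega
    rw [h0]
    simp

-- first occurrence of t[i] in a duplicate-free t is at i
lemma remove?_getD_nodup : ∀ (t : List Int), t.Nodup → ∀ i, i < t.length →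
    PySem.List.remove? t (t.getD i 0) = some (t.eraseIdx i) := by
  intro t
  induction t with
  | nil => intro _ i hi; simp at hi
  | cons x xs ih =>
    intro hnd i hi
    cases i with
    | zero => simp [PySem.List.remove?_cons_self]
    | succ i =>
      have hi' : i < xs.length := by simpa using hi
      have hmem : xs.getD i 0 ∈ xs := by rw [List.getD_eq_getElem _ _ hi']; exact List.getElem_mem hi'
      have hne : x ≠ xs.getD i 0 := fun h => (List.nodup_cons.mp hnd).1 (h ▸ hmem)
      simp only [List.getD_cons_succ, List.eraseIdx_cons_succ]
      rw [PySem.List.remove?_cons_of_ne _ hne, ih (List.nodup_cons.mp hnd).2 i hi']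
      rfl

lemma map_getD_range (l : List Int) : (List.range l.length).map (fun i => l.getD i 0) = l := by
  apply List.ext_getElem
  · simp
  · intro i h1 h2
    simp [List.getD_eq_getElem?_getD, List.getElem?_eq_getElem h2]

lemma flatMap_index (l : List Int) (f : Int → List (List (List Int))) :
    l.flatMap f = (List.range l.length).flatMap (fun i => f (l.getD i 0)) := by
  conv_lhs => rw [← map_getD_range l]
  rw [List.flatMap_map]

lemma enum_main (n : Nat) : ∀ (c t : List Int), t.length = n → c.length = n →
    t.Nodup → 1 ≤ n →
    enum_control_bn c t =
      (pyPermsGo n t).map (fun p => (List.zipWith (fun a b => [a, b]) c p).reverse) := by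
  induction n with
  | zero => intro _ _ _ _ _ h; omega
  | succ n ih =>
    intro c t ht hc hnd _
    by_cases hone : n = 0
    · -- base case of A
      subst hone
      obtain ⟨t0, rfl⟩ : ∃ t0, t = [t0] := by
        cases t with
        | nil => simp at ht
        | cons a l => exact ⟨a, by cases l with | nil => rfl | cons b l' => simp at ht⟩
      obtain ⟨c0, rfl⟩ : ∃ c0, c = [c0] := by
        cases c with
        | nil => simp at hc
        | cons a l => exact ⟨a, by cases l with | nil => rfl | cons b l' => simp at hc⟩
      rw [enum_control_bn.eq_def]
      simp [pyPermsGo]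
    · -- recursive case: n + 1 ≥ 2
      obtain ⟨c0, c', rfl⟩ : ∃ c0 c', c = c0 :: c' := by
        cases c with
        | nil => simp at hc
        | cons a l => exact ⟨a, l, rfl⟩
      rw [enum_step _ _ (by rintro ⟨h1, h2⟩; simp at hc; omega)]
      rw [flatMap_index]
      rw [pyPermsGo, List.map_flatMap]
      rw [ht]
      apply List.flatMap_congr
      intro i hi
      have hi' : i < t.length := by rw [ht]; exact List.mem_range.mp hi
      rw [remove?_getD_nodup t hnd i hi', Option.getD_some]
      have hlen : (t.eraseIdx i).length = n := by
        rw [List.length_eraseIdx_of_lt hi']; omega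
      have hnd' : (t.eraseIdx i).Nodup := hnd.sublist (List.eraseIdx_sublist t i)
      have hc' : c'.length = n := by simpa using hc
      rw [show (c0 :: c').drop 1 = c' from rfl,
          ih c' (t.eraseIdx i) hlen hc' hnd' (by omega)]
      rw [List.map_map, List.map_map]
      apply List.map_congr_left
      intro p _
      simp

-- duplicate pair of targets: A and B agree even without Nodup
lemma enum_dup2 (c0 c1 a : Int) :
    enum_control_bn [c0, c1] [a, a] = enum_control_bn_alt [c0, c1] [a, a] := by
  rw [enum_step _ _ (by simp)]
  have hbase : enum_control_bn [c1] [a] = [[[c1, a]]] := by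
    rw [enum_control_bn.eq_def]; simp
  simp [PySem.List.remove?_cons_self, hbase, enum_control_bn_alt, pyPerms, pyPermsGo,
    List.range_succ]

-- ===== VERDICT (by name: the statement is the Claim_ definition above) =====
theorem enum_control_bn_spec : Claim_equal_enum_control_bn := by
  intro c t _ hpre
  unfold Spec_enum_control_bn
  by_cases heq : c.length = t.length
  · by_cases h0 : c.length = 0
    · have hc : c = [] := List.eq_nil_of_length_eq_zero h0
      have ht : t = [] := List.eq_nil_of_length_eq_zero (by omega)
      subst hc; subst ht
      rw [enum_control_bn_alt, if_pos (by simp)]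
      rw [enum_step _ _ (by simp)]
      simp
    · by_cases hnd : t.Nodup
      · rw [enum_control_bn_alt, if_neg (by omega)]
        unfold pyPerms
        rw [enum_main t.length c t rfl (by omega) hnd (by omega)]
      · -- Pre_ forces t.length ≤ 2 here; a non-Nodup list of length ≤ 2 is [a, a]
        have hlen2 : t.length ≤ 2 := by
          rcases hpre with h | h | h
          · omega
          · exact h
          · exact absurd h hnd
        obtain ⟨a, b, rfl⟩ : ∃ a b, t = [a, b] := by
          match t, hnd with
          | [], hnd => simp at hnd
          | [x], hnd => simp at hnd
          | x :: y :: z :: l, _ => simp at hlen2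
          | [x, y], hnd => exact ⟨x, y, rfl⟩
        have hab : a = b := by
          by_contra hne
          exact hnd (by simp [hne])
        subst hab
        obtain ⟨c0, c1, rfl⟩ : ∃ c0 c1, c = [c0, c1] := by
          match c, heq with
          | [x, y], _ => exact ⟨x, y, rfl⟩
          | [], heq => simp at heq
          | [x], heq => simp at heq
          | x :: y :: z :: l, heq => simp at heq
        exact enum_dup2 c0 c1 a
  · rw [enum_control_bn_alt, if_pos (Or.inl heq)]
    exact enum_uneq t.length t c (le_refl _) heq
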